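-- pv_equiv track=rewrite | github.com/CiscoDevNet/ansible-nd | plugins/module_utils/orchestrators/infra_tenant.py | _group_associations_by_tenant
-- ===== SOURCE A (Python) =====
-- from typing import Type, ClassVar, List, Dict, Any, Optional
--
-- def _group_associations_by_tenant(associations: List[Dict[str, Any]]) -> Dict[str, List[Dict[str, Any]]]:
--     """Group fabric associations by tenant name, stripping tenantName and syncStatus."""
--     grouped: Dict[str, List[Dict[str, Any]]] = {}
--     for assoc in associations:
--         tenant_name = assoc.get("tenantName")
--         if not tenant_name:
--             continue
--         entry = {k: v for k, v in assoc.items() if k not in ("tenantName", "syncStatus")}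
--         grouped.setdefault(tenant_name, []).append(entry)
--     return grouped
-- ===== SOURCE B (Python) =====
-- def _group_associations_by_tenant(associations):
--     """Group fabric associations by tenant name, stripping tenantName and syncStatus.
--
--     Two-pass shape: first collect the distinct truthy tenant names in order of
--     first appearance, then build each tenant's list of stripped entries by a
--     direct comprehension over the input.
--     """
--     def strip(assoc):
--         return {k: v for k, v in assoc.items() if k not in ("tenantName", "syncStatus")}
--
--     tenants = []
--     for assoc in associations:
--         t = assoc.get("tenantName")
--         if t and t not in tenants:
--             tenants.append(t)
--     return {t: [strip(a) for a in associations if a.get("tenantName") == t] for t in tenants}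
-- ===== Notes on version B (the rewrite author's own statement) =====
-- stated objective: alternative
-- what changed: Replaces A's single-pass incremental setdefault/append dict accumulation with a two-pass shape: first collect the distinct truthy tenant names in order of first appearance, then build each tenant's list of stripped entries by a direct comprehension over the input.
import Mathlib
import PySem

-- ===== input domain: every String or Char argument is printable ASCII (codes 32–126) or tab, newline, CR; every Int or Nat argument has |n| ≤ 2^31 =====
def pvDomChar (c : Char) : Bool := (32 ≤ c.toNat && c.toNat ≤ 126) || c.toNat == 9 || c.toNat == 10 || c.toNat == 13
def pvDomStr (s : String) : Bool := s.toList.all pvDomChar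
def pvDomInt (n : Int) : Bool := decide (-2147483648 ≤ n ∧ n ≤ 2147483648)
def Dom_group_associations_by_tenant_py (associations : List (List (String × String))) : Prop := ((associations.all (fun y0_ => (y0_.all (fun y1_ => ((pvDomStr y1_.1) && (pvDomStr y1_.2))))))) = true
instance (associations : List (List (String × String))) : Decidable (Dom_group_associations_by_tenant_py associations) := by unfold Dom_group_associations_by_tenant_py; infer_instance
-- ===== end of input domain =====

-- B replaces A's incremental setdefault/append dict accumulation by a two-pass shape
-- (collect distinct truthy tenant names first, then build each tenant's stripped list
-- by a direct sweep); objective: alternative, not faster.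

-- shared helper: `assoc.get("tenantName")` (both Pythons call it)
def pvAssocGet (assoc : List (String × String)) : Option String :=
  (PySem.Dict.mk assoc).get? "tenantName"

-- shared helper: the dict comprehension dropping "tenantName" and "syncStatus"
-- (identical in both Pythons)
def pvStrip (assoc : List (String × String)) : List (String × String) :=
  assoc.filter (fun kv => ¬ (kv.1 = "tenantName" ∨ kv.1 = "syncStatus"))

-- ===== PORT A =====
-- loop body of A: skip falsy tenant, else grouped.setdefault(t, []).append(entry)
def pvAStep (grouped : PySem.Dict String (List (List (String × String))))
    (assoc : List (String × String)) : PySem.Dict String (List (List (String × String))) :=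
  match pvAssocGet assoc with
  | none => grouped
  | some t => if t = "" then grouped
      else PySem.Dict.modify grouped t [] (fun l => l ++ [pvStrip assoc])

def group_associations_by_tenant_py (associations : List (List (String × String))) :
    List (String × List (List (String × String))) :=
  (associations.foldl pvAStep PySem.Dict.empty).items

-- ===== PORT B =====
-- first pass of B: distinct truthy tenant names in order of first appearance
def pvBStep (ts : List String) (assoc : List (String × String)) : List String :=
  match pvAssocGet assoc with
  | none => ts
  | some t => if t ≠ "" ∧ t ∉ ts then ts ++ [t] else ts

-- second pass of B: `[strip(a) for a in associations if a.get("tenantName") == t]`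
def pvEntries (associations : List (List (String × String))) (t : String) :
    List (List (String × String)) :=
  associations.filterMap (fun a => if pvAssocGet a = some t then some (pvStrip a) else none)

def group_associations_by_tenant_py_alt (associations : List (List (String × String))) :
    List (String × List (List (String × String))) :=
  (associations.foldl pvBStep []).map (fun t => (t, pvEntries associations t))

-- ===== PRECONDITION & SPEC =====
def Spec_group_associations_by_tenant_py (associations : List (List (String × String))) (out : List (String × List (List (String × String)))) : Prop := out = group_associations_by_tenant_py_alt associations
instance (associations : List (List (String × String))) (out : List (String × List (List (String × String)))) : Decidable (Spec_group_associations_by_tenant_py associations out) := by unfold Spec_group_associations_by_tenant_py; infer_instance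

-- ===== CLAIM (what is proved, stated in full; the proofs are below) =====
def Claim_equal_group_associations_by_tenant_py : Prop := ∀ (associations : List (List (String × String))), Dom_group_associations_by_tenant_py associations → Spec_group_associations_by_tenant_py associations (group_associations_by_tenant_py associations)

-- ===== LEMMAS AND PROOFS =====

-- pvBStep only ever appends, so membership is preserved along the fold
theorem pv_tmem_mono (l : List (List (String × String))) (ts : List String) (t : String)
    (h : t ∈ ts) : t ∈ l.foldl pvBStep ts := by
  induction l generalizing ts with
  | nil => exact h
  | cons a l ih =>
      refine ih _ ?_
      cases hga : pvAssocGet a with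
      | none => simpa [pvBStep, hga] using h
      | some t' =>
          by_cases hc : t' ≠ "" ∧ t' ∉ ts <;> simp [pvBStep, hga, hc, h]

-- the tenant list stays duplicate-free and free of ""
theorem pv_tfold_inv (l : List (List (String × String))) (ts : List String)
    (hnd : ts.Nodup) (hne : ∀ t ∈ ts, t ≠ "") :
    (l.foldl pvBStep ts).Nodup ∧ ∀ t ∈ l.foldl pvBStep ts, t ≠ "" := by
  induction l generalizing ts with
  | nil => exact ⟨hnd, hne⟩
  | cons a l ih =>
      have hstep : (pvBStep ts a).Nodup ∧ ∀ t ∈ pvBStep ts a, t ≠ "" := by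
        cases hga : pvAssocGet a with
        | none => simp only [pvBStep, hga]; exact ⟨hnd, hne⟩
        | some t' =>
            simp only [pvBStep, hga]
            split
            · next hc =>
                constructor
                · exact List.Nodup.append hnd (List.nodup_singleton _)
                    (by simp only [List.disjoint_singleton]; exact hc.2)
                · intro t ht
                  rcases List.mem_append.mp ht with h1 | h1
                  · exact hne t h1
                  · simp only [List.mem_singleton] at h1; subst h1; exact hc.1
            · exact ⟨hnd, hne⟩
      exact ih _ hstep.1 hstep.2

-- a truthy tenant missing from the collected list has no entries
theorem pv_entries_nil (l : List (List (String × String))) (ts : List String) (t : String)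
    (hne : t ≠ "") (h : t ∉ l.foldl pvBStep ts) : pvEntries l t = [] := by
  induction l generalizing ts with
  | nil => rfl
  | cons a l ih =>
      have hstep : t ∉ l.foldl pvBStep (pvBStep ts a) := h
      have hna : pvAssocGet a ≠ some t := by
        intro heq
        apply h
        rw [List.foldl_cons]
        apply pv_tmem_mono
        simp only [pvBStep, heq]
        by_cases hm : t ∈ ts <;> simp [hm, hne]
      unfold pvEntries
      rw [List.filterMap_cons]
      simp only [if_neg hna]
      exact ih _ hstep

theorem pv_entries_append (l : List (List (String × String))) (a : List (String × String))
    (t : String) :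
    pvEntries (l ++ [a]) t
      = pvEntries l t ++ (if pvAssocGet a = some t then [pvStrip a] else []) := by
  unfold pvEntries
  rw [List.filterMap_append]
  congr 1
  by_cases h : pvAssocGet a = some t <;> simp [h]

-- the main invariant: A's dict, as an items list, is B's map over the tenant list
theorem pv_main (l : List (List (String × String))) :
    (l.foldl pvAStep PySem.Dict.empty).items
      = (l.foldl pvBStep []).map (fun t => (t, pvEntries l t)) := by
  induction l using List.reverseRecOn with
  | nil => rfl
  | append_singleton l a ih =>
      obtain ⟨hnd, hne⟩ := pv_tfold_inv l [] List.nodup_nil (by simp)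
      have hkeys : (l.foldl pvAStep PySem.Dict.empty).keys = l.foldl pvBStep [] := by
        show (l.foldl pvAStep PySem.Dict.empty).items.map (·.1) = _
        rw [ih, List.map_map]
        simp [Function.comp_def]
      rw [List.foldl_append, List.foldl_append]
      simp only [List.foldl_cons, List.foldl_nil]
      cases hga : pvAssocGet a with
      | none =>
          simp only [pvAStep, pvBStep, hga]
          rw [ih]
          apply List.map_congr_left
          intro t _
          rw [pv_entries_append]
          simp [hga]
      | some t =>
          by_cases ht : t = ""
          · subst ht
            simp only [pvAStep, pvBStep, hga, if_true, ne_eq, not_true_eq_false,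
              false_and, if_false]
            rw [ih]
            apply List.map_congr_left
            intro t' ht'
            rw [pv_entries_append, hga]
            have h2 : ¬ ((some "" : Option String) = some t') := by
              simpa using (hne t' ht').symm
            simp [h2]
          · by_cases hmem : t ∈ l.foldl pvBStep []
            · -- existing tenant: in-place update on both sides
              have hcon : (l.foldl pvAStep PySem.Dict.empty).contains t = true :=
                (PySem.Dict.contains_iff_mem_keys _ _).mpr (hkeys ▸ hmem)
              have hmm : (t, pvEntries l t) ∈ (l.foldl pvAStep PySem.Dict.empty).items := by
                rw [ih]; exact List.mem_map_of_mem hmem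
              have hgetD : (l.foldl pvAStep PySem.Dict.empty).getD t [] = pvEntries l t :=
                PySem.Dict.getD_of_mem_items _ hmm (hkeys ▸ hnd) []
              simp only [pvAStep, pvBStep, hga, PySem.Dict.modify]
              rw [if_neg ht, if_neg (by simp [hmem]), hgetD]
              rw [PySem.Dict.items_insert_of_contains _ _ hcon, ih, List.map_map]
              apply List.map_congr_left
              intro t' ht'
              simp only [Function.comp_apply]
              by_cases hte : t' = t
              · subst hte
                rw [pv_entries_append, hga]
                simp
              · have hne' : ¬ ((some t : Option String) = some t') := by
                  simp only [Option.some.injEq]; exact fun h => hte h.symm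
                rw [pv_entries_append, hga]
                simp [hte, hne']
            · -- new tenant: appended at the end on both sides
              have hcon : (l.foldl pvAStep PySem.Dict.empty).contains t = false := by
                rw [← Bool.not_eq_true]
                intro hc
                exact hmem (hkeys ▸ (PySem.Dict.contains_iff_mem_keys _ _).mp hc)
              have hgetD : (l.foldl pvAStep PySem.Dict.empty).getD t [] = [] :=
                PySem.Dict.getD_of_not_contains _ _ hcon
              simp only [pvAStep, pvBStep, hga, PySem.Dict.modify]
              rw [if_neg ht, if_pos (by exact ⟨ht, hmem⟩), hgetD]
              rw [PySem.Dict.items_insert_of_not_contains _ _ hcon, ih, List.map_append]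
              congr 1
              · apply List.map_congr_left
                intro t' ht'
                have hne' : ¬ ((some t : Option String) = some t') := by
                  simp only [Option.some.injEq]; exact fun h => hmem (h ▸ ht')
                rw [pv_entries_append, hga]
                simp [hne']
              · rw [List.map_singleton, pv_entries_append, hga,
                  pv_entries_nil l [] t ht hmem]
                simp

-- ===== VERDICT (by name: the statement is the Claim_ definition above) =====
theorem group_associations_by_tenant_py_spec : Claim_equal_group_associations_by_tenant_py := by
  intro associations _
  show group_associations_by_tenant_py associations = group_associations_by_tenant_py_alt associations
  unfold group_associations_by_tenant_py group_associations_by_tenant_py_alt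
  exact pv_main associations
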